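-- pv_equiv track=rewrite | github.com/aishwarya-2708/NewsAIAgent_Final | agents/mcts_rag_agent.py | _fill_to_target
-- ===== SOURCE A (Python) =====
-- def _fill_to_target(selected_indices, candidates, target_count):
--     selected_indices = list(selected_indices or [])
--     if len(selected_indices) >= target_count:
--         return selected_indices[:target_count]
--
--     remaining = [i for i in range(len(candidates)) if i not in selected_indices]
--     remaining.sort(key=lambda i: candidates[i].get('relevance_score', 0), reverse=True)
--     selected_indices.extend(remaining[:max(0, target_count - len(selected_indices))])
--     return selected_indices[:target_count]
-- ===== SOURCE B (Python) =====
-- def _fill_to_target(selected_indices, candidates, target_count):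
--     result = list(selected_indices or [])
--     if len(result) >= target_count:
--         return result[:target_count]
--     pool = [i for i in range(len(candidates)) if i not in result]
--     while len(result) < target_count and pool:
--         best = max(pool, key=lambda i: candidates[i].get('relevance_score', 0))
--         pool.remove(best)
--         result.append(best)
--     return result
-- ===== Notes on version B (the rewrite author's own statement) =====
-- stated objective: alternative
-- what changed: Replaces the full stable reverse sort of the remaining indices followed by slicing with an incremental selection loop that repeatedly extracts the first maximum-relevance index from the pool until the target is reached, so no sorted list is ever built.
import Mathlib
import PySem

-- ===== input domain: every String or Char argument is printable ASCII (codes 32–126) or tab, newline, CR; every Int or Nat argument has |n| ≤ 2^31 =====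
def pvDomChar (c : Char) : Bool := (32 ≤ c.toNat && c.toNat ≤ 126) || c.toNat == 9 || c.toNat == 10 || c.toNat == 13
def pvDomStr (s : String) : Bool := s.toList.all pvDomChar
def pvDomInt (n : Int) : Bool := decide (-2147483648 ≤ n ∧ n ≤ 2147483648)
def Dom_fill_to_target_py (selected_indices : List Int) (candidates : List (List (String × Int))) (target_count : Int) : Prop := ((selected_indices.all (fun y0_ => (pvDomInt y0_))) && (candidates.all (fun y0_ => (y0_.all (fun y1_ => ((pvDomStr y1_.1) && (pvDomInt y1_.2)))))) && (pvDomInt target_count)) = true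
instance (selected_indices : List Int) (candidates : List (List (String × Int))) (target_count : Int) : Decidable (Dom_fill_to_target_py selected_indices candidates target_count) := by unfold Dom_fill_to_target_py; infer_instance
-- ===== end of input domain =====

-- B replaces A's full stable reverse sort + slice by a repeated-first-maximum selection loop (objective: alternative).

-- ===== PORT A =====
-- candidate.get('relevance_score', 0): first-match lookup in the association list (Python dict convention)
def pvScore (c : List (String × Int)) : Int :=
  ((c.find? (fun kv => kv.1 == "relevance_score")).map Prod.snd).getD 0

def fill_to_target_py (selected_indices : List Int) (candidates : List (List (String × Int))) (target_count : Int) : List Int :=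
  if (selected_indices.length : Int) ≥ target_count then
    PySem.List.slice selected_indices none (some target_count)
  else
    let remaining := (PySem.List.pyRange 0 (candidates.length : Int) 1).filter
      (fun i => !(selected_indices.contains i))
    let remainingSorted := PySem.List.sorted remaining
      (fun i => pvScore (PySem.List.pyGetD candidates i [])) true
    let selected := selected_indices ++
      PySem.List.slice remainingSorted none (some (max 0 (target_count - (selected_indices.length : Int))))
    PySem.List.slice selected none (some target_count)

-- ===== PORT B =====
-- the while loop of Source B: pick the first maximum-relevance index, move it from pool to result
def pvFillLoop (candidates : List (List (String × Int))) (pool : List Int) (result : List Int) (target_count : Int) : List Int :=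
  if (result.length : Int) < target_count ∧ pool ≠ [] then
    match hm : PySem.List.max? pool (fun i => pvScore (PySem.List.pyGetD candidates i [])) with
    | some best =>
      match hr : PySem.List.remove? pool best with
      | some pool' => pvFillLoop candidates pool' (result ++ [best]) target_count
      | none => result   -- unreachable: best ∈ pool
    | none => result     -- unreachable: pool ≠ []
  else result
termination_by pool.length
decreasing_by
  have hmem := PySem.List.max?_mem hm
  rw [PySem.List.remove?_eq_some_erase pool best hmem] at hr
  cases hr
  have h1 := List.length_erase_of_mem hmem
  have h2 := List.length_pos_of_mem hmem
  omega

def fill_to_target_py_alt (selected_indices : List Int) (candidates : List (List (String × Int))) (target_count : Int) : List Int :=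
  if (selected_indices.length : Int) ≥ target_count then
    PySem.List.slice selected_indices none (some target_count)
  else
    let pool := (PySem.List.pyRange 0 (candidates.length : Int) 1).filter
      (fun i => !(selected_indices.contains i))
    pvFillLoop candidates pool selected_indices target_count

-- ===== PRECONDITION & SPEC =====
def Spec_fill_to_target_py (selected_indices : List Int) (candidates : List (List (String × Int))) (target_count : Int) (out : List Int) : Prop := out = fill_to_target_py_alt selected_indices candidates target_count
instance (selected_indices : List Int) (candidates : List (List (String × Int))) (target_count : Int) (out : List Int) : Decidable (Spec_fill_to_target_py selected_indices candidates target_count out) := by unfold Spec_fill_to_target_py; infer_instance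

-- ===== CLAIM (what is proved, stated in full; the proofs are below) =====
def Claim_equal_fill_to_target_py : Prop := ∀ (selected_indices : List Int) (candidates : List (List (String × Int))) (target_count : Int), Dom_fill_to_target_py selected_indices candidates target_count → Spec_fill_to_target_py selected_indices candidates target_count (fill_to_target_py selected_indices candidates target_count)

-- ===== LEMMAS AND PROOFS =====

-- sorted over a snoc inserts the last element into the sorted prefix
theorem pv_sorted_rev_snoc {α : Type} (xs : List α) (x : α) (key : α → Int) :
    PySem.List.sorted (xs ++ [x]) key true =
      PySem.List.insertBy (fun a b => decide (key b < key a)) x (PySem.List.sorted xs key true) := by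
  rw [PySem.List.sorted_rev_eq_foldl_insertBy, PySem.List.sorted_rev_eq_foldl_insertBy,
    List.foldl_append]
  rfl

theorem pv_max?_snoc {α : Type} (xs : List α) (x : α) (key : α → Int) :
    PySem.List.max? (xs ++ [x]) key =
      match PySem.List.max? xs key with
      | none => some x
      | some m => if key m < key x then some x else some m := by
  unfold PySem.List.max?
  rw [List.foldl_append]
  rfl

-- head/tail decomposition of the stable reverse sort by the first maximum
theorem pv_sorted_rev_eq_max_cons {α : Type} [DecidableEq α] (key : α → Int) :
    ∀ (xs : List α) (m : α), PySem.List.max? xs key = some m →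
      PySem.List.sorted xs key true = m :: PySem.List.sorted (xs.erase m) key true := by
  intro xs
  induction xs using List.reverseRecOn with
  | nil => intro m hm; simp [PySem.List.max?] at hm
  | append_singleton ys x ih =>
    intro m hm
    rw [pv_max?_snoc] at hm
    cases hy : PySem.List.max? ys key with
    | none =>
      have hys : ys = [] := by
        cases ys with
        | nil => rfl
        | cons a t =>
          exfalso
          have := (PySem.List.max?_eq_none_iff _ _).mp hy
          simp at this
      subst hys
      rw [hy] at hm
      simp at hm
      subst hm
      simp [PySem.List.sorted, PySem.List.insertBy]
    | some b =>
      rw [hy] at hm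
      simp at hm
      by_cases hlt : key b < key x
      · rw [if_pos hlt] at hm
        cases hm
        have hnotin : x ∉ ys := by
          intro hin
          have := PySem.List.max?_isMax hy x hin
          omega
        have herase : (ys ++ [x]).erase x = ys := by
          rw [List.erase_append_right _ hnotin]
          simp
        rw [herase, pv_sorted_rev_snoc]
        cases hs : PySem.List.sorted ys key true with
        | nil =>
          have : ys = [] := (PySem.List.sorted_eq_nil_iff _ _ _).mp hs
          subst this
          simp [PySem.List.max?] at hy
        | cons h t =>
          have hhm : ∀ y ∈ ys, key y ≤ key b := PySem.List.max?_isMax hy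
          have hh : h ∈ ys := by
            have := PySem.List.mem_sorted (xs := ys) (key := key) (rev := true) (x := h)
            rw [hs] at this
            simpa using this.mp (by simp)
          have : key h < key x := lt_of_le_of_lt (hhm h hh) hlt
          simp [PySem.List.insertBy, this]
      · rw [if_neg hlt] at hm
        cases hm
        have hmem : m ∈ ys := PySem.List.max?_mem hy
        have herase : (ys ++ [x]).erase m = ys.erase m ++ [x] :=
          List.erase_append_left _ hmem
        rw [herase, pv_sorted_rev_snoc, pv_sorted_rev_snoc, ih m hy]
        have hxm : ¬ (key m < key x) := hlt
        simp [PySem.List.insertBy, hxm]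

-- the selection loop produces exactly the sorted-prefix A takes
theorem pv_fillLoop_eq (candidates : List (List (String × Int))) :
    ∀ (pool : List Int) (result : List Int) (target_count : Int),
      pvFillLoop candidates pool result target_count =
        result ++ (PySem.List.sorted pool (fun i => pvScore (PySem.List.pyGetD candidates i [])) true).take
          (target_count - (result.length : Int)).toNat := by
  have main : ∀ (n : Nat) (pool : List Int), pool.length = n → ∀ (result : List Int) (target_count : Int),
      pvFillLoop candidates pool result target_count =
        result ++ (PySem.List.sorted pool (fun i => pvScore (PySem.List.pyGetD candidates i [])) true).take
          (target_count - (result.length : Int)).toNat := by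
    intro n
    induction n using Nat.strong_induction_on with
    | _ n ih =>
    intro pool hn result target_count
    rw [pvFillLoop]
    by_cases hc : (result.length : Int) < target_count ∧ pool ≠ []
    · rw [if_pos hc]
      obtain ⟨hlt, hne⟩ := hc
      have hmax : ∃ m, PySem.List.max? pool (fun i => pvScore (PySem.List.pyGetD candidates i [])) = some m := by
        cases h : PySem.List.max? pool (fun i => pvScore (PySem.List.pyGetD candidates i [])) with
        | none => exact absurd ((PySem.List.max?_eq_none_iff _ _).mp h) hne
        | some m => exact ⟨m, rfl⟩
      obtain ⟨m, hm⟩ := hmax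
      have hmem : m ∈ pool := PySem.List.max?_mem hm
      rw [hm]
      simp only
      rw [PySem.List.remove?_eq_some_erase pool m hmem]
      simp only
      have hlen : (pool.erase m).length < n := by
        have h1 := List.length_erase_of_mem hmem
        have h2 := List.length_pos_of_mem hmem
        omega
      rw [ih (pool.erase m).length hlen (pool.erase m) rfl (result ++ [m]) target_count]
      rw [pv_sorted_rev_eq_max_cons _ pool m hm]
      have hk : (target_count - (result.length : Int)).toNat =
          (target_count - ((result ++ [m]).length : Int)).toNat + 1 := by
        simp only [List.length_append, List.length_cons, List.length_nil]
        omega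
      rw [hk, List.take_succ_cons, List.append_assoc]
      rfl
    · rw [if_neg hc]
      rcases not_and_or.mp hc with h | h
      · have : (target_count - (result.length : Int)).toNat = 0 := by omega
        simp [this]
      · have : pool = [] := not_not.mp h
        subst this
        simp [PySem.List.sorted]
  intro pool
  exact main pool.length pool rfl

theorem pv_main (selected_indices : List Int) (candidates : List (List (String × Int))) (target_count : Int) :
    fill_to_target_py selected_indices candidates target_count =
      fill_to_target_py_alt selected_indices candidates target_count := by
  unfold fill_to_target_py fill_to_target_py_alt
  by_cases hge : (selected_indices.length : Int) ≥ target_count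
  · rw [if_pos hge, if_pos hge]
  · rw [if_neg hge, if_neg hge]
    simp only
    set key : Int → Int := fun i => pvScore (PySem.List.pyGetD candidates i []) with hkey
    set pool := (PySem.List.pyRange 0 (candidates.length : Int) 1).filter
      (fun i => !(selected_indices.contains i)) with hpool
    rw [pv_fillLoop_eq]
    have hlt : (selected_indices.length : Int) < target_count := by omega
    have hmax : max 0 (target_count - (selected_indices.length : Int)) =
        target_count - (selected_indices.length : Int) := by omega
    rw [hmax]
    rw [PySem.List.slice_to _ (by omega : (0:Int) ≤ target_count - (selected_indices.length : Int))]
    set s := PySem.List.sorted pool key true with hs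
    rw [PySem.List.slice_to _ (by omega : (0:Int) ≤ target_count)]
    apply List.take_of_length_le
    simp only [List.length_append, List.length_take]
    omega

-- ===== VERDICT (by name: the statement is the Claim_ definition above) =====
theorem fill_to_target_py_spec : Claim_equal_fill_to_target_py := by
  intro selected_indices candidates target_count _
  unfold Spec_fill_to_target_py
  exact pv_main selected_indices candidates target_count
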